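-- pv_equiv track=rewrite | github.com/Andy963/note | Algorithm/空栈压数/空栈压数.py | solve
-- ===== SOURCE A (Python) =====
-- def solve(nums):
--     stack = []
--     for n in nums:
--         total = n
--         flag = False
--         length = len(stack)
--         while length > 0 and total > 0:
--             total -= stack[length-1]
--             if total == 0:
--                 stack = stack[:length-1]
--                 stack.append(n*2)
--                 flag = True
--             length -= 1
--         if not flag:
--             stack.append(n)
--     return stack[::-1]
-- ===== SOURCE B (Python) =====
-- # Different algorithm: instead of re-scanning the stack for every push, keep the stack
-- # bottom-first with a monotonic chain of its strict suffix-minimum prefix-sum boundaries;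
-- # the boundary where A's top-down scan would stop is found by one binary search on the chain.
-- def solve(nums):
--     vals = []          # stack, bottom-first
--     total = 0          # sum of vals
--     chain = [(0, 0)]   # (j, S_j) for boundaries j with S_j < S_k for all boundaries k > j;
--                        # strictly increasing in both coordinates; last entry = (len(vals), total)
--     for n in nums:
--         t = total - n
--         p = _search(chain, t)  # largest position with chain sum <= t, or -1
--         if p >= 0 and chain[p][1] == t:
--             j = chain[p][0]
--             del vals[j:]
--             del chain[p + 1:]
--             vals.append(2 * n)
--             total = t + 2 * n
--         else:
--             vals.append(n)
--             total += n
--         while chain and chain[-1][1] >= total: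
--             chain.pop()
--         chain.append((len(vals), total))
--     return vals[::-1]
--
--
-- def _search(chain, t):
--     # chain sums are strictly increasing: binary search for the last one <= t
--     lo, hi = 0, len(chain)
--     while lo < hi:
--         mid = (lo + hi) // 2
--         if chain[mid][1] <= t:
--             lo = mid + 1
--         else:
--             hi = mid
--     return lo - 1
-- ===== Notes on version B (the rewrite author's own statement) =====
-- stated objective: faster
-- what changed: B never re-scans the stack: it keeps the stack bottom-first together with a monotonic chain of its strict suffix-minimum prefix-sum boundaries, finds the boundary where A's top-down subtraction scan would stop by one binary search on the chain, and maintains the chain with amortized monotonic-stack pops.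
import Mathlib
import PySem

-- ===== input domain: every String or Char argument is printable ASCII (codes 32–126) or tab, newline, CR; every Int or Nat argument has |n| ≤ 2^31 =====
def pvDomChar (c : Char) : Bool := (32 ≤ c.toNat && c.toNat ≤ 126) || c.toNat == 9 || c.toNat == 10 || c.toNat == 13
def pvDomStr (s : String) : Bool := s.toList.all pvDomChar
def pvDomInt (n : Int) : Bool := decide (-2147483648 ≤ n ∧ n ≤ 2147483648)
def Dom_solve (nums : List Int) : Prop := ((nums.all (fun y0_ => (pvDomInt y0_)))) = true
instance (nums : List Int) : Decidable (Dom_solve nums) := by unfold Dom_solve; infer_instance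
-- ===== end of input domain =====

-- B replaces A's per-push top-down subtraction scan by a different algorithm: a monotonic
-- chain of strict suffix-minimum prefix-sum boundaries, queried by binary search.

-- ===== PORT A =====
-- the inner 'while length > 0 and total > 0' loop of A; stack[length-1] is always in
-- range (0 < length ≤ stack.length), so pyGetD is exact here
def solveLoop (n : Int) (stack : List Int) (total : Int) (length : Nat) (flag : Bool) :
    List Int × Bool :=
  if 0 < length ∧ 0 < total then
    let t := total - PySem.List.pyGetD stack ((length : Int) - 1) 0
    if t = 0 then
      solveLoop n (PySem.List.slice stack none (some ((length : Int) - 1)) ++ [n * 2])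
        t (length - 1) true
    else
      solveLoop n stack t (length - 1) flag
  else (stack, flag)
termination_by length
decreasing_by all_goals omega

def solve (nums : List Int) : List Int :=
  -- stack[::-1] is List.reverse (exact)
  (nums.foldl (fun stack n =>
      let r := solveLoop n stack n stack.length false
      if r.2 then r.1 else r.1 ++ [n]) []).reverse

-- ===== PORT B =====
-- Source B's _search: 'while lo < hi' binary search; chain[mid] is in range (0 ≤ mid < hi ≤ len)
def searchChain (chain : List (Int × Int)) (t : Int) : Nat → Nat → Int
  | lo, hi =>
    if lo < hi then
      let mid := (lo + hi) / 2
      if (PySem.List.pyGetD chain ((mid : Nat) : Int) (0, 0)).2 ≤ t then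
        searchChain chain t (mid + 1) hi
      else searchChain chain t lo mid
    else (lo : Int) - 1
termination_by lo hi => hi - lo
decreasing_by all_goals omega

-- Source B's 'while chain and chain[-1][1] >= total: chain.pop()'; pop() drops the last element
def popChain (total : Int) (c : List (Int × Int)) : List (Int × Int) :=
  if h : c ≠ [] ∧ total ≤ (PySem.List.pyGetD c (-1) (0, 0)).2 then
    popChain total (c.take (c.length - 1))
  else c
termination_by c.length
decreasing_by
  have : c.length ≠ 0 := fun h0 => h.1 (List.eq_nil_of_length_eq_zero h0)
  simp
  omega

-- loop body of Source B's solve; state = (vals, total, chain); 'del xs[k:]' is xs[:k] = slice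
def stepB (st : List Int × Int × List (Int × Int)) (n : Int) : List Int × Int × List (Int × Int) :=
  let vals := st.1
  let total := st.2.1
  let chain := st.2.2
  let t := total - n
  let p := searchChain chain t 0 chain.length
  let st' :=
    if 0 ≤ p ∧ (PySem.List.pyGetD chain p (0, 0)).2 = t then
      let j := (PySem.List.pyGetD chain p (0, 0)).1
      (PySem.List.slice vals none (some j) ++ [2 * n],
        t + 2 * n,
        PySem.List.slice chain none (some (p + 1)))
    else (vals ++ [n], total + n, chain)
  let chain' := popChain st'.2.1 st'.2.2
  (st'.1, st'.2.1, chain' ++ [((st'.1.length : Int), st'.2.1)])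

def solve_alt (nums : List Int) : List Int :=
  ((nums.foldl stepB ([], 0, [(0, 0)])).1).reverse

-- ===== PRECONDITION & SPEC =====
def Spec_solve (nums : List Int) (out : List Int) : Prop := out = solve_alt nums
instance (nums : List Int) (out : List Int) : Decidable (Spec_solve nums out) := by unfold Spec_solve; infer_instance

-- ===== CLAIM (what is proved, stated in full; the proofs are below) =====
def Claim_equal_solve : Prop := ∀ (nums : List Int), Dom_solve nums → Spec_solve nums (solve nums)

-- ===== LEMMAS AND PROOFS =====

-- proof-side view of A's inner loop: 'some rs' = merge found, rs the surviving part (top-first)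
def scanRes (rest : List Int) (total : Int) : Option (List Int) :=
  if 0 < total then
    match rest with
    | [] => none
    | x :: rs => if total - x = 0 then some rs else scanRes rs (total - x)
  else none

-- proof-side view of A's outer-loop body
def stepA (s : List Int) (n : Int) : List Int :=
  match scanRes s.reverse n with
  | some rs => rs.reverse ++ [n * 2]
  | none => s ++ [n]

-- number of elements A's inner loop consumes before stopping (none = runs off the stack)
def stopLen (rest : List Int) (total : Int) : Option Nat :=
  if 0 < total then
    match rest with
    | [] => none
    | x :: rs => (stopLen rs (total - x)).map (· + 1)
  else some 0

theorem solveLoop_eq_scanRes (n : Int) (s : List Int) :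
    ∀ (ℓ : Nat), ℓ ≤ s.length → ∀ (total : Int),
      solveLoop n s total ℓ false =
        match scanRes ((s.take ℓ).reverse) total with
        | some rs => (rs.reverse ++ [n * 2], true)
        | none => (s, false) := by
  intro ℓ
  induction ℓ with
  | zero => intro _ total; rw [solveLoop.eq_def, scanRes.eq_def]; simp
  | succ k ih =>
      intro hle total
      have hk : k < s.length := by omega
      rw [solveLoop]
      by_cases h : 0 < total
      · simp only [if_pos (And.intro (Nat.succ_pos k) h)]
        have hidx : ((k + 1 : Nat) : Int) - 1 = ((k : Nat) : Int) := by push_cast; ring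
        have hget : PySem.List.pyGetD s (((k + 1 : Nat) : Int) - 1) 0 = s[k] := by
          rw [hidx, PySem.List.pyGetD_natCast, List.getD_eq_getElem?_getD,
            List.getElem?_eq_getElem hk]; rfl
        have htake : (s.take (k + 1)).reverse = s[k] :: (s.take k).reverse := by
          rw [List.take_add_one, List.getElem?_eq_getElem hk]
          simp
        rw [scanRes.eq_def, htake]
        simp only [if_pos h]
        by_cases h0 : total - s[k] = 0
        · simp only [hget, h0]
          rw [solveLoop]
          have : ¬ (0 < k + 1 - 1 ∧ (0:Int) < 0) := by simp
          rw [if_neg this]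
          simp [PySem.List.slice_to_natCast]
        · simp only [hget, if_neg h0]
          have := ih (le_of_lt hk) (total - s[k])
          simpa using this
      · have : ¬ (0 < k + 1 ∧ 0 < total) := by tauto
        rw [if_neg this, scanRes.eq_def]
        simp [h]

theorem stepA_eq (s : List Int) (n : Int) :
    (let r := solveLoop n s n s.length false
     if r.2 then r.1 else r.1 ++ [n]) = stepA s n := by
  have hA := solveLoop_eq_scanRes n s s.length (le_refl _) n
  simp only [List.take_length] at hA
  unfold stepA
  rw [hA]
  cases scanRes s.reverse n with
  | none => simp
  | some rs => simp

theorem stopLen_iff_aux : ∀ (rest : List Int) (total : Int) (i : Nat),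
    stopLen rest total = some i ↔
      (i ≤ rest.length ∧ total ≤ (rest.take i).sum ∧
        ∀ i' < i, (rest.take i').sum < total) := by
  intro rest
  induction rest with
  | nil =>
      intro total i
      rw [stopLen.eq_def]
      by_cases ht : 0 < total
      · rw [if_pos ht]
        constructor
        · intro h
          dsimp only at h
          simp at h
        · rintro ⟨h1, h2, h3⟩
          simp at h2
          omega
      · rw [if_neg ht]
        constructor
        · intro h
          injection h with h
          subst h
          exact ⟨by omega, by simp; omega, by omega⟩
        · rintro ⟨h1, h2, h3⟩
          have h0 : i = 0 := by simp at h1; omega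
          rw [h0]
  | cons x rs ih =>
      intro total i
      rw [stopLen.eq_def]
      by_cases ht : 0 < total
      · simp only [if_pos ht]
        constructor
        · intro h
          simp only [Option.map_eq_some_iff] at h
          obtain ⟨k, hk, rfl⟩ := h
          obtain ⟨h1, h2, h3⟩ := (ih (total - x) k).mp hk
          refine ⟨by simp; omega, ?_, ?_⟩
          · simp only [List.take_succ_cons, List.sum_cons]; omega
          · intro i' hi'
            cases i' with
            | zero => simpa using ht
            | succ i'' =>
                simp only [List.take_succ_cons, List.sum_cons]
                have := h3 i'' (by omega)
                omega
        · rintro ⟨h1, h2, h3⟩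
          cases i with
          | zero => simp at h2; omega
          | succ k =>
              simp only [Option.map_eq_some_iff]
              refine ⟨k, (ih (total - x) k).mpr ⟨by simp at h1; omega, ?_, ?_⟩, rfl⟩
              · simp only [List.take_succ_cons, List.sum_cons] at h2; omega
              · intro i' hi'
                have := h3 (i' + 1) (by omega)
                simp only [List.take_succ_cons, List.sum_cons] at this
                omega
      · simp only [if_neg ht]
        constructor
        · intro h
          injection h with h
          subst h
          exact ⟨by omega, by simp; omega, by omega⟩
        · rintro ⟨h1, h2, h3⟩
          congr 1
          by_contra hne
          have hi : 0 < i := by omega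
          have := h3 0 hi
          simp at this
          omega


-- A's scan in terms of its stop length: merge iff it stops with remainder exactly 0
theorem scanRes_eq_stopLen (rest : List Int) : ∀ (total : Int),
    scanRes rest total =
      match stopLen rest total with
      | none => none
      | some i => if 0 < i ∧ (rest.take i).sum = total then some (rest.drop i) else none := by
  induction rest with
  | nil =>
      intro total
      rw [scanRes.eq_def, stopLen.eq_def]
      by_cases ht : 0 < total
      · simp [ht]
      · simp [ht]
  | cons x rs ih =>
      intro total
      rw [scanRes.eq_def, stopLen.eq_def]
      by_cases ht : 0 < total
      · simp only [if_pos ht]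
        by_cases hz : total - x = 0
        · rw [if_pos hz]
          have h0 : stopLen rs (total - x) = some 0 := by
            rw [stopLen.eq_def]
            simp [hz]
          rw [h0]
          have hx : x = total := by omega
          simp [hx]
        · rw [if_neg hz, ih (total - x)]
          cases hsl : stopLen rs (total - x) with
          | none => simp
          | some k =>
              dsimp only [Option.map_some]
              cases k with
              | zero =>
                  have hL : ¬ ((0:Nat) < 0 ∧ (rs.take 0).sum = total - x) := by simp
                  rw [if_neg hL]
                  have hR : ¬ ((0:Nat) < 0 + 1 ∧ ((x :: rs).take (0 + 1)).sum = total) := by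
                    rintro ⟨-, h⟩
                    simp at h
                    omega
                  rw [if_neg hR]
              | succ k' =>
                  by_cases hcc : 0 < k' + 1 ∧ (rs.take (k' + 1)).sum = total - x
                  · rw [if_pos hcc]
                    have : 0 < k' + 1 + 1 ∧ ((x :: rs).take (k' + 1 + 1)).sum = total := by
                      simp only [List.take_succ_cons, List.sum_cons]
                      exact ⟨by omega, by omega⟩
                    rw [if_pos this]
                    simp
                  · rw [if_neg hcc]
                    have : ¬ (0 < k' + 1 + 1 ∧ ((x :: rs).take (k' + 1 + 1)).sum = total) := by
                      simp only [List.take_succ_cons, List.sum_cons]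
                      intro hh
                      exact hcc ⟨by omega, by omega⟩
                    rw [if_neg this]
      · simp [ht]

-- ===== the chain of strict suffix-minimum boundaries =====

-- boundary j of the stack is a strict suffix minimum of the prefix sums
def minB (vals : List Int) (j : Nat) : Bool :=
  decide (∀ k, k < vals.length + 1 → j < k → (vals.take j).sum < (vals.take k).sum)

-- the canonical chain: all strict suffix-minimum boundaries with their prefix sums
def canonChain (vals : List Int) : List (Int × Int) :=
  ((List.range (vals.length + 1)).filter (fun j => minB vals j)).map
    (fun (j : Nat) => ((j : Int), (vals.take j).sum))

theorem minB_length (vals : List Int) : minB vals vals.length = true := by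
  simp only [minB, decide_eq_true_eq]
  intro k hk hlk
  omega

theorem canonChain_last (vals : List Int) :
    canonChain vals =
      ((List.range vals.length).filter (fun j => minB vals j)).map
        (fun (j : Nat) => ((j : Int), (vals.take j).sum)) ++ [((vals.length : Int), vals.sum)] := by
  unfold canonChain
  rw [List.range_succ, List.filter_append, List.map_append]
  congr 1
  simp [minB_length vals]

theorem canonChain_ne_nil (vals : List Int) : canonChain vals ≠ [] := by
  rw [canonChain_last]; simp

-- entries of the canonical chain, valued through the range/filter representation
theorem canonChain_getElem (vals : List Int) (i : Nat) (h : i < (canonChain vals).length) :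
    ∃ j : Nat, j < vals.length + 1 ∧ minB vals j = true ∧
      (canonChain vals)[i] = ((j : Int), (vals.take j).sum) := by
  unfold canonChain at h ⊢
  rw [List.getElem_map]
  have hl : i < ((List.range (vals.length + 1)).filter (fun j => minB vals j)).length := by
    simpa using h
  have hmem := List.getElem_mem hl
  rw [List.mem_filter] at hmem
  exact ⟨_, List.mem_range.mp hmem.1, hmem.2, rfl⟩

-- chain sums are strictly increasing with the position
theorem canonChain_sums_lt (vals : List Int) :
    (canonChain vals).Pairwise (fun a b => a.2 < b.2) := by
  unfold canonChain
  rw [List.pairwise_map]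
  have hr : ((List.range (vals.length + 1)).filter (fun j => minB vals j)).Pairwise (· < ·) :=
    (List.pairwise_lt_range).filter _
  refine hr.imp_of_mem ?_
  intro a b ha hb hab
  rw [List.mem_filter] at ha hb
  have hbr := List.mem_range.mp hb.1
  have hmin := of_decide_eq_true ha.2
  exact hmin b hbr hab

-- ===== binary search on the chain =====

theorem searchChain_spec (chain : List (Int × Int)) (t : Int)
    (hmono : ∀ (i j : Nat) (hij : i ≤ j) (hj : j < chain.length),
      (chain[i]'(by omega)).2 ≤ chain[j].2) :
    ∀ (d lo hi : Nat), hi - lo ≤ d → hi ≤ chain.length →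
      (∀ (i : Nat) (h : i < chain.length), i < lo → chain[i].2 ≤ t) →
      (∀ (i : Nat) (h : i < chain.length), hi ≤ i → ¬ chain[i].2 ≤ t) →
      lo ≤ hi →
      (∀ (i : Nat) (h : i < chain.length),
          ((i : Int) ≤ searchChain chain t lo hi ↔ chain[i].2 ≤ t)) ∧
        ((lo : Int) - 1 ≤ searchChain chain t lo hi ∧ searchChain chain t lo hi < (hi : Int)) := by
  intro d
  induction d with
  | zero =>
      intro lo hi hd hhi h1 h2 hlh
      rw [searchChain]
      have hnlt : ¬ lo < hi := by omega
      rw [if_neg hnlt]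
      refine ⟨?_, by omega, by omega⟩
      intro i h
      constructor
      · intro hle
        exact h1 i h (by omega)
      · intro hx
        by_contra hi'
        exact h2 i h (by omega) hx
  | succ d ih =>
      intro lo hi hd hhi h1 h2 hlh
      rw [searchChain]
      by_cases hcase : lo < hi
      · rw [if_pos hcase]
        have hmidlt : (lo + hi) / 2 < chain.length := by omega
        have hget : (PySem.List.pyGetD chain (((lo + hi) / 2 : Nat) : Int) (0, 0)).2 =
            (chain[(lo + hi) / 2]).2 := by
          rw [PySem.List.pyGetD_natCast, List.getD_eq_getElem?_getD,
            List.getElem?_eq_getElem hmidlt]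
          rfl
        simp only [hget]
        by_cases hcmp : (chain[(lo + hi) / 2]).2 ≤ t
        · rw [if_pos hcmp]
          have hres := ih ((lo + hi) / 2 + 1) hi (by omega) hhi ?_ h2 (by omega)
          · exact ⟨hres.1, by omega, by
              have := hres.2.2
              omega⟩
          · intro i' h' hi'
            calc (chain[i']).2 ≤ (chain[(lo + hi) / 2]).2 := hmono i' _ (by omega) hmidlt
              _ ≤ t := hcmp
        · rw [if_neg hcmp]
          have hres := ih lo ((lo + hi) / 2) (by omega) (by omega) h1 ?_ (by omega)
          · exact ⟨hres.1, by omega, by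
              have := hres.2.2
              omega⟩
          · intro i' h' hi' hx'
            exact hcmp (le_trans (hmono _ i' hi' h') hx')
      · rw [if_neg hcase]
        refine ⟨?_, by omega, by omega⟩
        intro i h
        constructor
        · intro hle
          exact h1 i h (by omega)
        · intro hx
          by_contra hi'
          exact h2 i h (by omega) hx

-- ===== generic list facts used to relate the chain operations =====

-- on a list sorted by the key, popping from the right while the key is ≥ T is filtering
theorem popChain_sorted (T : Int) : ∀ (c : List (Int × Int)),
    c.Pairwise (fun a b => a.2 < b.2) →
    popChain T c = c.filter (fun e => decide (e.2 < T)) := by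
  intro c
  induction c using List.reverseRecOn with
  | nil => intro _; rw [popChain]; simp
  | append_singleton c e ih =>
      intro hp
      have hpc : c.Pairwise (fun a b => a.2 < b.2) := (List.pairwise_append.mp hp).1
      have hce : ∀ x ∈ c, x.2 < e.2 := by
        intro x hx
        exact (List.pairwise_append.mp hp).2.2 x hx e (by simp)
      have hlast : PySem.List.pyGetD (c ++ [e]) (-1) ((0 : Int), (0 : Int)) = e :=
        PySem.List.pyGetD_neg_one_append_singleton c e ((0 : Int), (0 : Int))
      rw [popChain]
      by_cases he : T ≤ e.2
      · rw [dif_pos ⟨by simp, by rw [hlast]; exact he⟩]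
        have htake : (c ++ [e]).take ((c ++ [e]).length - 1) = c := by
          simp
        rw [htake, ih hpc, List.filter_append]
        have : ¬ (e.2 < T) := by omega
        simp [this]
      · rw [dif_neg (by
          rintro ⟨-, hh⟩
          rw [hlast] at hh
          exact he hh)]
        rw [List.filter_append]
        have h1 : c.filter (fun e => decide (e.2 < T)) = c := by
          rw [List.filter_eq_self]
          intro x hx
          have := hce x hx
          simp
          omega
        have h2 : [e].filter (fun e => decide (e.2 < T)) = [e] := by
          simp
          omega
        rw [h1, h2]

-- if membership below an index k agrees with a predicate, take k is filter
theorem take_eq_filter (p : Int × Int → Bool) : ∀ (l : List (Int × Int)) (k : Nat),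
    (∀ (i : Nat) (h : i < l.length), (i < k ↔ p l[i] = true)) →
    l.take k = l.filter p := by
  intro l
  induction l with
  | nil => intro k _; simp
  | cons x xs ih =>
      intro k hk
      cases k with
      | zero =>
          rw [List.take_zero]
          symm
          rw [List.filter_eq_nil_iff]
          intro a ha
          obtain ⟨i, h, rfl⟩ := List.mem_iff_getElem.mp ha
          intro hpa
          have := (hk i h).mpr hpa
          omega
      | succ k' =>
          have hx : p x = true := (hk 0 (by simp)).mp (by omega)
          rw [List.take_succ_cons, List.filter_cons_of_pos hx]
          congr 1
          apply ih
          intro i h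
          have := hk (i + 1) (by simp; omega)
          simpa using this

-- appending one element: old boundaries survive iff their sum is below the new total
theorem minB_append_singleton (u : List Int) (c : Int) (j : Nat) (hj : j < u.length + 1) :
    minB (u ++ [c]) j = (minB u j && decide ((u.take j).sum < u.sum + c)) := by
  simp only [minB]
  rw [← Bool.decide_and, decide_eq_decide]
  constructor
  · intro h
    refine ⟨?_, ?_⟩
    · intro k hk hjk
      have := h k (by simp; omega) hjk
      rw [List.take_append_of_le_length (by omega), List.take_append_of_le_length (by omega)] at this
      exact this
    · have := h (u.length + 1) (by simp) (by omega)
      have htop : (u ++ [c]).take (u.length + 1) = u ++ [c] :=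
        List.take_of_length_le (by simp)
      rw [List.take_append_of_le_length (by omega), htop] at this
      rw [List.sum_append, List.sum_cons, List.sum_nil, add_zero] at this
      exact this
  · rintro ⟨h1, h2⟩ k hk hjk
    rw [List.take_append_of_le_length (by omega)]
    by_cases hkl : k ≤ u.length
    · rw [List.take_append_of_le_length (by omega)]
      exact h1 k (by omega) hjk
    · have hk1 : k = u.length + 1 := by simp at hk; omega
      have htop : (u ++ [c]).take (u.length + 1) = u ++ [c] :=
        List.take_of_length_le (by simp)
      rw [hk1, htop, List.sum_append, List.sum_cons, List.sum_nil, add_zero]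
      exact h2

theorem canonChain_append_singleton (u : List Int) (c : Int) :
    canonChain (u ++ [c]) =
      (canonChain u).filter (fun e => decide (e.2 < u.sum + c)) ++
        [(((u.length + 1 : Nat) : Int), u.sum + c)] := by
  rw [canonChain_last (u ++ [c])]
  have hlen : (u ++ [c]).length = u.length + 1 := by simp
  congr 1
  · rw [hlen]
    unfold canonChain
    rw [List.filter_map, List.filter_filter]
    have hfil : (List.range (u.length + 1)).filter
        (fun a => ((fun e => decide (e.2 < u.sum + c)) ∘
          fun (j : Nat) => ((j : Int), (u.take j).sum)) a && minB u a) =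
        (List.range (u.length + 1)).filter (fun j => minB (u ++ [c]) j) := by
      apply List.filter_congr
      intro j hj
      show (decide ((u.take j).sum < u.sum + c) && minB u j) = minB (u ++ [c]) j
      rw [minB_append_singleton u c j (List.mem_range.mp hj)]
      exact Bool.and_comm _ _
    rw [hfil]
    apply List.map_congr_left
    intro j hj
    rw [List.mem_filter, List.mem_range] at hj
    rw [List.take_append_of_le_length (by omega)]
  · simp

theorem canonChain_take (vals : List Int) (j : Nat) (t : Int)
    (hj : j < vals.length + 1) (hmax : ∀ k, k < vals.length + 1 → (vals.take k).sum ≤ t → k ≤ j)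
    (hjt : (vals.take j).sum = t) (hmin : minB vals j = true) :
    (canonChain vals).filter (fun e => decide (e.2 ≤ t)) = canonChain (vals.take j) := by
  have hl : (vals.take j).length = j := List.length_take_of_le (by omega)
  have hsu : ∀ k, k ≤ j → ((vals.take j).take k).sum = (vals.take k).sum := by
    intro k hk
    rw [List.take_take, Nat.min_eq_left hk]
  have hminT : ∀ j', j' < j + 1 →
      (minB vals j' && decide ((vals.take j').sum ≤ t)) = minB (vals.take j) j' := by
    intro j' hj'
    simp only [minB]
    rw [← Bool.decide_and, decide_eq_decide, hl]
    constructor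
    · rintro ⟨hP, hQ⟩ k hk hj'k
      rw [hsu j' (by omega), hsu k (by omega)]
      exact hP k (by omega) hj'k
    · intro hR
      have hjlt : ∀ hne : j' ≠ j, (vals.take j').sum < (vals.take j).sum := by
        intro hne
        have := hR j (by omega) (by omega)
        rw [hsu j' (by omega), hsu j (by omega)] at this
        exact this
      constructor
      · intro k hk hj'k
        by_cases hkj : k ≤ j
        · have := hR k (by omega) hj'k
          rw [hsu j' (by omega), hsu k (by omega)] at this
          exact this
        · have hkt : ¬ (vals.take k).sum ≤ t := fun hc => by
            have := hmax k hk hc; omega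
          by_cases hjj : j' = j
          · subst hjj; omega
          · have := hjlt hjj; omega
      · by_cases hjj : j' = j
        · subst hjj; omega
        · have := hjlt hjj; omega
  unfold canonChain
  rw [List.filter_map, List.filter_filter, hl]
  have hclean : (List.range (vals.length + 1)).filter
      (fun a => ((fun e => decide (e.2 ≤ t)) ∘
        fun (j : Nat) => ((j : Int), (vals.take j).sum)) a && minB vals a) =
      (List.range (vals.length + 1)).filter
        (fun a => minB vals a && decide ((vals.take a).sum ≤ t)) := by
    apply List.filter_congr
    intro a ha
    show (decide ((vals.take a).sum ≤ t) && minB vals a) = _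
    exact Bool.and_comm _ _
  rw [hclean]
  have hsplit : vals.length + 1 = (j + 1) + (vals.length - j) := by omega
  rw [hsplit, List.range_add, List.filter_append]
  have h2 : ((List.range (vals.length - j)).map (fun i => (j + 1) + i)).filter
      (fun a => minB vals a && decide ((vals.take a).sum ≤ t)) = [] := by
    rw [List.filter_eq_nil_iff]
    intro a ha
    obtain ⟨i, hi, rfl⟩ := List.mem_map.mp ha
    have hgt : ¬ (vals.take ((j + 1) + i)).sum ≤ t := fun hc => by
      have hmr := List.mem_range.mp hi
      have := hmax ((j + 1) + i) (by omega) hc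
      omega
    simp [hgt]
  rw [h2, List.append_nil]
  have h3 : (List.range (j + 1)).filter
      (fun a => minB vals a && decide ((vals.take a).sum ≤ t)) =
      (List.range (j + 1)).filter (fun a => minB (vals.take j) a) := by
    apply List.filter_congr
    intro a ha
    exact hminT a (List.mem_range.mp ha)
  rw [h3]
  apply List.map_congr_left
  intro a ha
  rw [List.mem_filter, List.mem_range] at ha
  rw [hsu a (by omega)]

-- ===== the two step functions agree =====

-- translation between top-first scans and bottom-first prefix sums
theorem rev_take_sum (vals : List Int) (i : Nat) :
    (vals.reverse.take i).sum = vals.sum - (vals.take (vals.length - i)).sum := by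
  have h := congrArg List.sum (List.take_append_drop i vals.reverse)
  rw [List.sum_append, List.sum_reverse] at h
  have hd : (vals.reverse.drop i).sum = (vals.take (vals.length - i)).sum := by
    rw [List.drop_reverse, List.sum_reverse]
  omega

theorem rev_drop (vals : List Int) (j : Nat) (h : j ≤ vals.length) :
    vals.reverse.drop (vals.length - j) = (vals.take j).reverse := by
  rw [List.drop_reverse]
  congr 2
  omega

theorem stopLen_rev (vals : List Int) (n : Int) (j : Nat) (hj : j ≤ vals.length)
    (hPj : (vals.take j).sum ≤ vals.sum - n)
    (hmax : ∀ k, k ≤ vals.length → (vals.take k).sum ≤ vals.sum - n → k ≤ j) :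
    stopLen vals.reverse n = some (vals.length - j) := by
  rw [stopLen_iff_aux]
  refine ⟨by simp, ?_, ?_⟩
  · rw [rev_take_sum]
    have he : vals.length - (vals.length - j) = j := by omega
    rw [he]
    omega
  · intro i' hi'
    rw [rev_take_sum]
    have hgt : ¬ (vals.take (vals.length - i')).sum ≤ vals.sum - n := by
      intro hle
      have := hmax _ (by omega) hle
      omega
    omega

theorem scanRes_rev_merge (vals : List Int) (n : Int) (j : Nat) (hj : j < vals.length)
    (hPj : (vals.take j).sum = vals.sum - n)
    (hmax : ∀ k, k ≤ vals.length → (vals.take k).sum ≤ vals.sum - n → k ≤ j) :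
    scanRes vals.reverse n = some ((vals.take j).reverse) := by
  rw [scanRes_eq_stopLen, stopLen_rev vals n j (by omega) (le_of_eq hPj) hmax]
  have hsum : (vals.reverse.take (vals.length - j)).sum = n := by
    rw [rev_take_sum]
    have he : vals.length - (vals.length - j) = j := by omega
    rw [he, hPj]
    ring
  dsimp only
  rw [if_pos ⟨by omega, hsum⟩, rev_drop vals j (by omega)]

theorem scanRes_rev_nomerge (vals : List Int) (n : Int) (j : Nat) (hj : j ≤ vals.length)
    (hPj : (vals.take j).sum ≤ vals.sum - n)
    (hmax : ∀ k, k ≤ vals.length → (vals.take k).sum ≤ vals.sum - n → k ≤ j)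
    (hne : ¬ (j < vals.length ∧ (vals.take j).sum = vals.sum - n)) :
    scanRes vals.reverse n = none := by
  rw [scanRes_eq_stopLen, stopLen_rev vals n j hj hPj hmax]
  dsimp only
  rw [if_neg]
  rintro ⟨hpos, hsum⟩
  rw [rev_take_sum] at hsum
  have he : vals.length - (vals.length - j) = j := by omega
  rw [he] at hsum
  exact hne ⟨by omega, by omega⟩

theorem scanRes_rev_none (vals : List Int) (n : Int)
    (hno : ∀ k, k ≤ vals.length → ¬ ((vals.take k).sum ≤ vals.sum - n)) :
    scanRes vals.reverse n = none := by
  rw [scanRes_eq_stopLen]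
  cases hsl : stopLen vals.reverse n with
  | none => rfl
  | some i =>
      exfalso
      obtain ⟨h1, h2, h3⟩ := (stopLen_iff_aux vals.reverse n i).mp hsl
      rw [rev_take_sum] at h2
      have h1' : i ≤ vals.length := by simpa using h1
      exact hno (vals.length - i) (by omega) (by omega)

theorem canonChain_mem (vals : List Int) (j : Nat) (hj : j < vals.length + 1)
    (hmin : minB vals j = true) :
    ((j : Int), (vals.take j).sum) ∈ canonChain vals := by
  unfold canonChain
  exact List.mem_map.mpr ⟨j, List.mem_filter.mpr ⟨List.mem_range.mpr hj, hmin⟩, rfl⟩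

theorem chain_strict (vals : List Int) (i k : Nat) (hik : i < k)
    (hk : k < (canonChain vals).length) :
    ((canonChain vals)[i]'(by omega)).2 < ((canonChain vals)[k]).2 :=
  List.pairwise_iff_getElem.mp (canonChain_sums_lt vals) i k (by omega) hk hik

theorem chain_mono (vals : List Int) (i k : Nat) (hik : i ≤ k)
    (hk : k < (canonChain vals).length) :
    ((canonChain vals)[i]'(by omega)).2 ≤ ((canonChain vals)[k]).2 := by
  rcases Nat.lt_or_ge i k with h | h
  · exact le_of_lt (chain_strict vals i k h hk)
  · have : i = k := by omega
    subst this
    exact le_refl _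

-- B's push branch produces exactly A's push and the new stack's canonical chain
theorem push_case (vals : List Int) (n : Int) (hA : scanRes vals.reverse n = none) :
    ((vals ++ [n] : List Int), vals.sum + n,
        popChain (vals.sum + n) (canonChain vals) ++
          [((((vals ++ [n] : List Int).length : Nat) : Int), vals.sum + n)]) =
      (stepA vals n, (stepA vals n).sum, canonChain (stepA vals n)) := by
  have hstepA : stepA vals n = vals ++ [n] := by unfold stepA; rw [hA]
  rw [hstepA]
  simp only [Prod.mk.injEq]
  refine ⟨trivial, by simp, ?_⟩
  rw [canonChain_append_singleton, popChain_sorted _ _ (canonChain_sums_lt vals)]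
  congr 1
  simp

theorem stepB_eq (vals : List Int) (n : Int) :
    stepB (vals, vals.sum, canonChain vals) n =
      (stepA vals n, (stepA vals n).sum, canonChain (stepA vals n)) := by
  have hCpos : 0 < (canonChain vals).length := List.length_pos_of_ne_nil (canonChain_ne_nil vals)
  simp only [stepB]
  set t := vals.sum - n with ht
  set C := canonChain vals with hC
  set p := searchChain C t 0 C.length with hp
  have hmono : ∀ (i j : Nat) (hij : i ≤ j) (hj : j < C.length), (C[i]'(by omega)).2 ≤ C[j].2 :=
    fun i j hij hj => chain_mono vals i j hij hj
  obtain ⟨hiff, hlb, hub⟩ := searchChain_spec C t hmono C.length 0 C.length (by omega)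
    (le_refl _) (by intro i h hi; omega) (by intro i h hi hx; omega) (by omega)
  by_cases hEx : ∃ j, j < vals.length + 1 ∧ (vals.take j).sum ≤ t
  · obtain ⟨jw, hjw, hjwP⟩ := hEx
    set js := Nat.findGreatest (fun j => (vals.take j).sum ≤ t) vals.length with hjs
    have hjsle : js ≤ vals.length := Nat.findGreatest_le vals.length
    have hjsP : (vals.take js).sum ≤ t := by
      rw [hjs]
      exact Nat.findGreatest_spec (P := fun j => (vals.take j).sum ≤ t) (m := jw)
        (n := vals.length) (by omega) hjwP
    have hjsmax : ∀ k, k ≤ vals.length → (vals.take k).sum ≤ t → k ≤ js := by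
      intro k hk hkP
      rw [hjs]
      exact Nat.le_findGreatest (P := fun j => (vals.take j).sum ≤ t) hk hkP
    have hminjs : minB vals js = true := by
      simp only [minB, decide_eq_true_eq]
      intro k hk hjk
      have hnk : ¬ (vals.take k).sum ≤ t := fun hc => by
        have := hjsmax k (by omega) hc; omega
      omega
    obtain ⟨q, hq, hqe⟩ := List.mem_iff_getElem.mp (canonChain_mem vals js (by omega) hminjs)
    have hqp : (q : Int) ≤ p := (hiff q hq).mpr (by
      show (C[q]'hq).2 ≤ t
      simp only [hC]
      rw [hqe]
      exact hjsP)
    have hpq : p = (q : Int) := by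
      by_contra hne
      have hqlt : q < p.toNat := by omega
      have hpn : p.toNat < C.length := by omega
      have hple : (C[p.toNat]).2 ≤ t := (hiff p.toNat hpn).mp (by omega)
      have hstr := chain_strict vals q p.toNat hqlt (hC ▸ hpn)
      obtain ⟨j2, hj2, hmin2, he2⟩ := canonChain_getElem vals p.toNat (hC ▸ hpn)
      rw [he2, hqe] at hstr
      have hple2 : (vals.take j2).sum ≤ t := by
        simp only [hC] at hple
        rw [he2] at hple
        exact hple
      simp only at hstr
      have hj2le : j2 ≤ js := hjsmax j2 (by omega) hple2
      have hj2ne : j2 ≠ js := by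
        intro h
        rw [h] at hstr
        omega
      have hminP := of_decide_eq_true hmin2
      have := hminP js (by omega) (by omega)
      omega
    have hget : PySem.List.pyGetD C p ((0 : Int), (0 : Int)) = ((js : Int), (vals.take js).sum) := by
      rw [hpq, PySem.List.pyGetD_natCast, List.getD_eq_getElem?_getD,
        List.getElem?_eq_getElem hq, Option.getD_some, hqe]
    by_cases hmerge : (vals.take js).sum = t
    · -- B merges exactly where A's scan stops
      rw [if_pos ⟨by omega, by rw [hget]; exact hmerge⟩]
      rw [hget]
      have hslice_v : PySem.List.slice vals none (some ((js : Nat) : Int)) = vals.take js := by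
        simp [PySem.List.slice_to_natCast]
      have hcast : p + 1 = (((q + 1 : Nat) : Nat) : Int) := by rw [hpq]; push_cast; ring
      have hslice_c : PySem.List.slice C none (some (p + 1)) = C.take (q + 1) := by
        rw [hcast, PySem.List.slice_to_natCast]
      have htf : C.take (q + 1) = C.filter (fun e => decide (e.2 ≤ t)) := by
        apply take_eq_filter
        intro i h
        have := hiff i h
        constructor
        · intro hik
          simp only [decide_eq_true_eq]
          exact this.mp (by omega)
        · intro hpi
          simp only [decide_eq_true_eq] at hpi
          have := this.mpr hpi
          omega
      have hchainU : C.filter (fun e => decide (e.2 ≤ t)) = canonChain (vals.take js) := by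
        rw [hC]
        exact canonChain_take vals js t (by omega)
          (fun k hk hkP => hjsmax k (by omega) hkP) hmerge hminjs
      simp only [hslice_v, hslice_c, htf, hchainU]
      by_cases hjslt : js < vals.length
      · have hA : scanRes vals.reverse n = some ((vals.take js).reverse) :=
          scanRes_rev_merge vals n js hjslt (by omega)
            (fun k hk hkP => hjsmax k hk (by omega))
        have hstepA : stepA vals n = vals.take js ++ [n * 2] := by
          unfold stepA
          rw [hA]
          simp
        rw [hstepA]
        simp only [Prod.mk.injEq]
        refine ⟨by rw [mul_comm], ?_, ?_⟩
        · rw [List.sum_append]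
          simp
          omega
        · rw [canonChain_append_singleton,
            popChain_sorted _ _ (canonChain_sums_lt (vals.take js))]
          have hus : (vals.take js).sum = t := hmerge
          have hul : (vals.take js).length = js := List.length_take_of_le (by omega)
          congr 1
          · congr 1
            funext e
            rw [hus]
            congr 1
            rw [mul_comm]
          · rw [hul]
            simp
            constructor
            · omega
            · rw [hus, mul_comm]
      · -- js = vals.length: then n = 0 and the "merge" is the same value as a push
        have hjseq : js = vals.length := by omega
        have hn0 : n = 0 := by
          have : (vals.take js).sum = vals.sum := by rw [hjseq, List.take_length]
          omega
        have hA : scanRes vals.reverse n = none :=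
          scanRes_rev_nomerge vals n js hjsle (by omega)
            (fun k hk hkP => hjsmax k hk (by omega)) (by omega)
        have hu : vals.take js = vals := by rw [hjseq, List.take_length]
        have h20 : (2 : Int) * n = n := by omega
        rw [hu, h20]
        have htn : t + n = vals.sum + n := by omega
        rw [htn]
        exact push_case vals n hA
    · -- stop without exact match: both push
      rw [if_neg (by
        rintro ⟨-, hh⟩
        rw [hget] at hh
        exact hmerge hh)]
      have hA : scanRes vals.reverse n = none :=
        scanRes_rev_nomerge vals n js hjsle (by omega)
          (fun k hk hkP => hjsmax k hk (by omega)) (by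
            rintro ⟨-, hh⟩
            exact hmerge (by omega))
      exact push_case vals n hA
  · -- no boundary sum is ≤ t: the scan runs off the stack, both push
    have hno : ∀ k, k ≤ vals.length → ¬ ((vals.take k).sum ≤ t) := by
      intro k hk hc
      exact hEx ⟨k, by omega, hc⟩
    have hp0 : ¬ (0 ≤ p) := by
      intro hc
      obtain ⟨j0, hj0, hmin0, he0⟩ := canonChain_getElem vals 0 (hC ▸ hCpos)
      have h0le := (hiff 0 hCpos).mp (by omega)
      simp only [hC] at h0le
      rw [he0] at h0le
      exact hno j0 (by omega) h0le
    rw [if_neg (fun hc => hp0 hc.1)]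
    have hA : scanRes vals.reverse n = none := scanRes_rev_none vals n (by
      intro k hk
      exact hno k hk)
    exact push_case vals n hA

theorem foldl_agree : ∀ (nums vals : List Int),
    List.foldl stepB (vals, vals.sum, canonChain vals) nums =
      (List.foldl stepA vals nums, (List.foldl stepA vals nums).sum,
        canonChain (List.foldl stepA vals nums)) := by
  intro nums
  induction nums with
  | nil => intro vals; simp
  | cons n ns ih =>
      intro vals
      simp only [List.foldl_cons]
      rw [stepB_eq vals n]
      exact ih (stepA vals n)

-- ===== VERDICT (by name: the statement is the Claim_ definition above) =====
theorem solve_spec : Claim_equal_solve := by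
  intro nums _
  unfold Spec_solve solve solve_alt
  have hbody : (fun (stack : List Int) (n : Int) =>
      let r := solveLoop n stack n stack.length false
      if r.2 then r.1 else r.1 ++ [n]) = stepA := by
    funext s n
    exact stepA_eq s n
  rw [hbody]
  have hcc : canonChain [] = [(0, 0)] := by decide
  have := foldl_agree nums []
  rw [hcc] at this
  simp only [List.sum_nil] at this
  rw [this]
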